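-- pv_equiv track=rewrite | github.com/miliar/Code_Jam_Webscraper | solutions_python/solutions_year15_round0_nr1/2601.py | solve
-- ===== SOURCE A (Python) =====
-- def solve(Smax, S):
--     extra = 0
--     for i, j in enumerate(S):
--         if i == 0:
--             continue
--         while i > sum(S[:i]) + extra:
--             extra += 1
--     return extra
-- ===== SOURCE B (Python) =====
-- def solve(Smax, S):
--     extra = 0
--     prefix = 0
--     for i, j in enumerate(S):
--         if i > prefix + extra:
--             extra = i - prefix
--         prefix += j
--     return extra
-- ===== Notes on version B (the rewrite author's own statement) =====
-- stated objective: faster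
-- what changed: Replaces the per-index re-summation of S[:i] plus an incrementing while-loop with a single pass that maintains a running prefix sum and takes extra = max(extra, i - prefix).
import Mathlib
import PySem

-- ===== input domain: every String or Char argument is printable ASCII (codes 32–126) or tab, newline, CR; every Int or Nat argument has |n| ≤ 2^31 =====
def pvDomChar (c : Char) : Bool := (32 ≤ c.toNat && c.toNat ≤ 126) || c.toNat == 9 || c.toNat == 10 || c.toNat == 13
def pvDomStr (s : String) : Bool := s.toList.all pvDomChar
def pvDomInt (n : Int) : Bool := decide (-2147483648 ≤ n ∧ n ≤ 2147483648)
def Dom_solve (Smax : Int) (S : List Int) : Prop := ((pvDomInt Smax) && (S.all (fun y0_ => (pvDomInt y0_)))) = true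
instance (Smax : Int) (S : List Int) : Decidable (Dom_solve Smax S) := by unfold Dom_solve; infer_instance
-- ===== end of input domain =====

-- B replaces A's per-index re-summation of S[:i] plus incrementing while-loop
-- with a single pass keeping a running prefix sum (extra = max(extra, i - prefix)).

-- ===== PORT A =====
-- A's 'while i > sum(S[:i]) + extra: extra += 1' loop (always terminates: extra grows)
def solveWhile (i s extra : Int) : Int :=
  if i > s + extra then solveWhile i s (extra + 1) else extra
termination_by (i - s - extra).toNat
decreasing_by omega

def solve (Smax : Int) (S : List Int) : Int :=
  (PySem.List.enumerate S 0).foldl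
    (fun extra p =>
      if p.1 == 0 then extra
      else solveWhile p.1 (PySem.List.slice S none (some p.1)).sum extra)
    0

-- ===== PORT B =====
def solve_alt (Smax : Int) (S : List Int) : Int :=
  ((PySem.List.enumerate S 0).foldl
    (fun (st : Int × Int) p =>
      (st.1 + p.2, if p.1 > st.1 + st.2 then p.1 - st.1 else st.2))
    (0, 0)).2

-- ===== PRECONDITION & SPEC =====
def Spec_solve (Smax : Int) (S : List Int) (out : Int) : Prop := out = solve_alt Smax S
instance (Smax : Int) (S : List Int) (out : Int) : Decidable (Spec_solve Smax S out) := by unfold Spec_solve; infer_instance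

-- ===== CLAIM (what is proved, stated in full; the proofs are below) =====
def Claim_equal_solve : Prop := ∀ (Smax : Int) (S : List Int), Dom_solve Smax S → Spec_solve Smax S (solve Smax S)

-- ===== LEMMAS AND PROOFS =====

-- the while-loop computes a max
theorem solveWhile_eq (i s : Int) : ∀ (e : Int), solveWhile i s e = max e (i - s) := by
  intro e
  rw [solveWhile]
  split
  · rename_i h
    rw [solveWhile_eq i s (e + 1)]
    simp only [Int.max_def]
    split_ifs <;> omega
  · rename_i h
    simp only [Int.max_def]
    split_ifs <;> omega
termination_by e => (i - s - e).toNat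
decreasing_by omega

-- invariant: on the suffix S.drop n, A's fold from extra = e equals B's fold from
-- (prefix, extra) = ((S.take n).sum, e) (at n = 0 both start with extra = 0)
theorem fold_eq (S : List Int) :
    ∀ (t : List Int) (n : Nat) (e : Int), t = S.drop n → (n = 0 → e = 0) →
    (PySem.List.enumerate t (n : Int)).foldl
      (fun extra p =>
        if p.1 == 0 then extra
        else solveWhile p.1 (PySem.List.slice S none (some p.1)).sum extra) e
    = ((PySem.List.enumerate t (n : Int)).foldl
        (fun (st : Int × Int) p =>
          (st.1 + p.2, if p.1 > st.1 + st.2 then p.1 - st.1 else st.2))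
        ((S.take n).sum, e)).2 := by
  intro t
  induction t with
  | nil => intro n e _ _; simp [PySem.List.enumerate_nil]
  | cons x t' ih =>
    intro n e ht h0
    have hx : S.drop n = x :: t' := ht.symm
    have hlt : n < S.length := by
      by_contra h
      rw [List.drop_eq_nil_of_le (by omega)] at hx
      exact List.cons_ne_nil x t' hx.symm
    have hget : S[n]? = some x := by
      have h1 : (S.drop n)[0]? = some x := by rw [hx]; rfl
      rw [List.getElem?_drop] at h1
      simpa using h1
    have hdrop : t' = S.drop (n + 1) := by
      have h1 : (S.drop n).tail = t' := by simp [hx]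
      simpa [List.tail_drop] using h1.symm
    have hsum : (S.take (n + 1)).sum = (S.take n).sum + x := by
      rw [List.take_add_one, hget]
      simp
    rw [PySem.List.enumerate_cons, List.foldl_cons, List.foldl_cons]
    dsimp only
    by_cases hn : n = 0
    · subst hn
      have he : e = 0 := h0 rfl
      subst he
      have h1 : (S.take 1).sum = x := by simpa using hsum
      have := ih 1 0 hdrop (by omega)
      simp only [Nat.cast_one] at this
      simpa [h1] using this
    · have hne : ((n : Int) == 0) = false := by simp; omega
      have hslice : PySem.List.slice S none (some (n : Int)) = S.take n :=
        PySem.List.slice_to_natCast S n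
      have hBval : (if (n:Int) > (S.take n).sum + e then (n:Int) - (S.take n).sum else e)
          = max e ((n:Int) - (S.take n).sum) := by
        simp only [Int.max_def]; split_ifs <;> omega
      rw [hne, hslice, hBval]
      simp only [Bool.false_eq_true, if_false]
      rw [solveWhile_eq]
      have := ih (n + 1) (max e ((n:Int) - (S.take n).sum)) hdrop (by omega)
      rw [hsum] at this
      push_cast at this
      exact this

-- ===== VERDICT (by name: the statement is the Claim_ definition above) =====
theorem solve_spec : Claim_equal_solve := by
  intro Smax S _
  unfold Spec_solve solve solve_alt
  have := fold_eq S S 0 0 (by simp) (fun _ => rfl)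
  simpa using this
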